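-- pv_equiv track=rewrite | github.com/psunlpgroup/FoVer | src/downstream_evaluation/evaluation/utils/normalize_answers/mmlu_pro_nomath.py | normalize_mmlu_pro_nomath_final_answer
-- ===== SOURCE A (Python) =====
-- def normalize_mmlu_pro_nomath_final_answer(answer: str) -> str:
--     """Normalize the final answer for the AQuA-RAT dataset."""
--
--     # all capital letters A-Z
--     option_candidates = [
--         "A", "B", "C", "D", "E", "F", "G", "H", "I", "J",
--         "K", "L", "M", "N", "O", "P", "Q", "R", "S", "T",
--         "U", "V", "W", "X", "Y", "Z"
--     ]
--
--     for option_candidate in option_candidates: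
--         if option_candidate in answer:
--             return f"{option_candidate}"
--     return answer  # not found
-- ===== SOURCE B (Python) =====
-- def normalize_mmlu_pro_nomath_final_answer(answer: str) -> str:
--     """Normalize the final answer for the AQuA-RAT dataset."""
--     uppercase = [c for c in answer if 'A' <= c <= 'Z']
--     return min(uppercase) if uppercase else answer
-- ===== Notes on version B (the rewrite author's own statement) =====
-- stated objective: idiomatic
-- what changed: Replaces A's loop over 26 fixed candidates with a substring test each by a single pass over the input that collects the uppercase ASCII letters and returns their minimum.
import Mathlib
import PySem

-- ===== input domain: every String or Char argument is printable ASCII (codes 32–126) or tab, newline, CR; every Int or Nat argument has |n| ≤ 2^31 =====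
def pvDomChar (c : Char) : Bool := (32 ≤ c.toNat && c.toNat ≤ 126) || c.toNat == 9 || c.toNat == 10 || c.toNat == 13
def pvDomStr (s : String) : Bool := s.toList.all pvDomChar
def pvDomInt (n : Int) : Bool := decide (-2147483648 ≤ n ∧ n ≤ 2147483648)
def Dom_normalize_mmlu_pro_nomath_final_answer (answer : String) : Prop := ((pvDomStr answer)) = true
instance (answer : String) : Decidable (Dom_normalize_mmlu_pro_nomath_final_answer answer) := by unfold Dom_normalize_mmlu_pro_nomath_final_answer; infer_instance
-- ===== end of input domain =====

-- B replaces A's 26-candidate substring scan by one pass collecting the uppercase ASCII letters and taking their minimum (objective: idiomatic; not measured faster).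

-- ===== PORT A =====
-- the fixed candidate list A builds
def pvOptionCandidates : List Char :=
  ['A', 'B', 'C', 'D', 'E', 'F', 'G', 'H', 'I', 'J',
   'K', 'L', 'M', 'N', 'O', 'P', 'Q', 'R', 'S', 'T',
   'U', 'V', 'W', 'X', 'Y', 'Z']

-- the for-loop with early return = find? over the candidates; 'option_candidate in answer' = Str.isIn
def normalize_mmlu_pro_nomath_final_answer (answer : String) : String :=
  match pvOptionCandidates.find? (fun c => PySem.Str.isIn (String.ofList [c]) answer) with
  | some c => String.ofList [c]
  | none => answer

-- ===== PORT B =====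
def normalize_mmlu_pro_nomath_final_answer_alt (answer : String) : String :=
  let uppercase := answer.toList.filter (fun c => decide ('A' ≤ c) && decide (c ≤ 'Z'))
  match PySem.List.min? uppercase (fun c => c) with
  | some m => String.ofList [m]
  | none => answer

-- ===== PRECONDITION & SPEC =====
def Spec_normalize_mmlu_pro_nomath_final_answer (answer : String) (out : String) : Prop := out = normalize_mmlu_pro_nomath_final_answer_alt answer
instance (answer : String) (out : String) : Decidable (Spec_normalize_mmlu_pro_nomath_final_answer answer out) := by unfold Spec_normalize_mmlu_pro_nomath_final_answer; infer_instance

-- ===== CLAIM (what is proved, stated in full; the proofs are below) =====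
def Claim_equal_normalize_mmlu_pro_nomath_final_answer : Prop := ∀ (answer : String), Dom_normalize_mmlu_pro_nomath_final_answer answer → Spec_normalize_mmlu_pro_nomath_final_answer answer (normalize_mmlu_pro_nomath_final_answer answer)

-- ===== LEMMAS AND PROOFS =====

-- a single-character substring test is list membership
theorem pv_isIn_singleton (c : Char) (s : String) :
    PySem.Str.isIn (String.ofList [c]) s = s.toList.contains c := by
  rw [Bool.eq_iff_iff, PySem.Str.isIn_iff_infix, List.contains_eq_mem, decide_eq_true_iff]
  have hlist : (String.ofList [c]).toList = [c] := by simp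
  rw [hlist]
  constructor
  · intro h; exact h.sublist.subset (by simp)
  · intro h
    rcases List.mem_iff_append.mp h with ⟨u, v, huv⟩
    exact ⟨u, v, by rw [huv]; simp⟩

-- a character is an uppercase ASCII letter iff it is one of the 26 candidates
theorem pv_mem_candidates (c : Char) :
    (decide ('A' ≤ c) && decide (c ≤ 'Z')) = true ↔ c ∈ pvOptionCandidates := by
  constructor
  · intro h
    simp only [Bool.and_eq_true, decide_eq_true_iff] at h
    obtain ⟨h1, h2⟩ := h
    have hv1 : 65 ≤ c.toNat := h1
    have hv2 : c.toNat ≤ 90 := h2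
    have hofNat : Char.ofNat c.toNat = c := Char.ofNat_toNat c
    set n := c.toNat with hn
    interval_cases n <;> (rw [← hofNat]; decide)
  · intro h
    fin_cases h <;> decide

-- core lemma: the first candidate present in l is the minimum of the filtered list,
-- for any strictly sorted candidate list and any predicate characterising membership in it
theorem pv_find_eq_min (cands : List Char) (q : Char → Bool) (l : List Char)
    (hs : cands.Pairwise (· < ·)) (hq : ∀ c, q c = true ↔ c ∈ cands) :
    cands.find? (fun c => l.contains c) = PySem.List.min? (l.filter q) (fun c => c) := by
  induction cands generalizing q with
  | nil =>
    have : l.filter q = [] := by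
      apply List.filter_eq_nil_iff.mpr
      intro a _ ha
      exact absurd ((hq a).mp ha) (List.not_mem_nil)
    simp [this, PySem.List.min?]
  | cons c cs ih =>
    rcases hmem : l.contains c with _ | _
    · -- c not in l: drop c from the candidates and from the predicate
      have hcnot : c ∉ l := by
        rw [List.contains_eq_mem, decide_eq_false_iff_not] at hmem; exact hmem
      have hd : decide (c ∈ l) = false := by rw [← List.contains_eq_mem]; exact hmem
      have hfind : (c :: cs).find? (fun x => l.contains x) = cs.find? (fun x => l.contains x) := by
        simp [List.find?, List.contains_eq_mem, hd]
      have hfilter : l.filter q = l.filter (fun x => decide (x ∈ cs)) := by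
        apply List.filter_congr
        intro x hx
        rcases hqx : q x with _ | _
        · symm; rw [decide_eq_false_iff_not]
          intro hxcs
          have : q x = true := (hq x).mpr (List.mem_cons_of_mem c hxcs)
          simp [hqx] at this
        · symm; rw [decide_eq_true_iff]
          have := (hq x).mp hqx
          rcases List.mem_cons.mp this with rfl | hxs
          · exact absurd hx hcnot
          · exact hxs
      rw [hfind, hfilter]
      exact ih (fun x => decide (x ∈ cs)) (List.Pairwise.of_cons hs)
        (fun x => by simp)
    · -- c in l: find? returns c, and c is the minimum of the filtered list
      have hcl : c ∈ l := by
        rw [List.contains_eq_mem, decide_eq_true_iff] at hmem; exact hmem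
      have hd : decide (c ∈ l) = true := by rw [← List.contains_eq_mem]; exact hmem
      have hfind : (c :: cs).find? (fun x => l.contains x) = some c := by
        simp [List.find?, List.contains_eq_mem, hd]
      rw [hfind]
      have hcfilter : c ∈ l.filter q := by
        apply List.mem_filter.mpr
        exact ⟨hcl, (hq c).mpr (List.mem_cons_self)⟩
      have hne : l.filter q ≠ [] := fun h => by simp [h] at hcfilter
      rcases hmin : PySem.List.min? (l.filter q) (fun x => x) with _ | m
      · exact absurd ((PySem.List.min?_eq_none_iff _ _).mp hmin) hne
      · have hm_mem : m ∈ l.filter q := PySem.List.min?_mem hmin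
        have hm_le : m ≤ c := PySem.List.min?_isMin hmin c hcfilter
        have hm_cand : m ∈ c :: cs := (hq m).mp (List.mem_filter.mp hm_mem).2
        have : m = c := by
          rcases List.mem_cons.mp hm_cand with rfl | hms
          · rfl
          · have : c < m := (List.pairwise_cons.mp hs).1 m hms
            exact absurd hm_le (not_le.mpr this)
        rw [this]

-- ===== VERDICT (by name: the statement is the Claim_ definition above) =====
theorem normalize_mmlu_pro_nomath_final_answer_spec : Claim_equal_normalize_mmlu_pro_nomath_final_answer := by
  intro answer _
  unfold Spec_normalize_mmlu_pro_nomath_final_answer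
  unfold normalize_mmlu_pro_nomath_final_answer normalize_mmlu_pro_nomath_final_answer_alt
  have hpred : (fun c => PySem.Str.isIn (String.ofList [c]) answer)
      = (fun c => answer.toList.contains c) := by
    funext c; exact pv_isIn_singleton c answer
  rw [hpred,
    pv_find_eq_min pvOptionCandidates (fun c => decide ('A' ≤ c) && decide (c ≤ 'Z'))
      answer.toList (by decide) pv_mem_candidates]
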